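-- pv_equiv track=rewrite | github.com/2019-iuc-sw-skku/AhnLab | package/package.py | debian_parse
-- ===== SOURCE A (Python) =====
-- def debian_parse(input_list):
--     description = 3
--     str_description = ''
--     res_list = []
--     package_info = []
--     for input_str in input_list:
--         if input_str == 'ii':
--             description = 3
--             package_info.append(str_description)
--             res_list.append(package_info)
--             str_description = ''
--             package_info = []
--             continue
--         if description == 0:
--             str_description += ' ' + input_str
--         else:
--             package_info.append(input_str)
--             description -= 1
--     package_info.append(str_description)
--     res_list.append(package_info)
--     return res_list
-- ===== SOURCE B (Python) =====
-- def debian_parse(input_list):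
--     def record(seg):
--         return seg[:3] + [''.join(' ' + x for x in seg[3:])]
--     res = []
--     seg = []
--     for t in input_list:
--         if t == 'ii':
--             res.append(record(seg))
--             seg = []
--         else:
--             seg.append(t)
--     res.append(record(seg))
--     return res
-- ===== Notes on version B (the rewrite author's own statement) =====
-- stated objective: simpler
-- what changed: B splits the input into segments at 'ii' markers and derives each record by slicing (seg[:3] plus a joined description of seg[3:]), eliminating A's mutable description countdown and string accumulator.
import Mathlib
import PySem

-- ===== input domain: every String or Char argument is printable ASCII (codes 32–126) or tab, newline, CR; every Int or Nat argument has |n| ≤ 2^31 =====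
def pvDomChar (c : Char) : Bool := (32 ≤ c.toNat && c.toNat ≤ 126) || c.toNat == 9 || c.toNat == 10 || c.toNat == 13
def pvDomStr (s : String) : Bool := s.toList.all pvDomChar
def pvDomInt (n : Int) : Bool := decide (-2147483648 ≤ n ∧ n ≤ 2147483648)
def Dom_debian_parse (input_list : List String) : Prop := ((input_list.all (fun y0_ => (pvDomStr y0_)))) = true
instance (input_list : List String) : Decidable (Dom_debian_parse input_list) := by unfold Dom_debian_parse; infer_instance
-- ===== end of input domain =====

-- B replaces A's description-countdown state machine by splitting the input into segments
-- at 'ii' markers and building each record by slicing (simpler decomposition; same cost).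


-- ===== PORT A =====
-- literal transliteration: state = (description, str_description, res_list, package_info)
def debian_parse (input_list : List String) : List (List String) :=
  let st := input_list.foldl
    (fun (st : Int × String × List (List String) × List String) input_str =>
      let (description, str_description, res_list, package_info) := st
      if input_str = "ii" then
        (3, "", res_list ++ [package_info ++ [str_description]], [])
      else if description = 0 then
        (description, str_description ++ " " ++ input_str, res_list, package_info)
      else
        (description - 1, str_description, res_list, package_info ++ [input_str]))
    (3, "", [], [])
  st.2.2.1 ++ [st.2.2.2 ++ [st.2.1]]

-- ===== PORT B =====
def debianRecord (seg : List String) : List String :=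
  seg.take 3 ++ [String.join ((seg.drop 3).map (fun x => " " ++ x))]

def debian_parse_alt (input_list : List String) : List (List String) :=
  let st := input_list.foldl
    (fun (st : List (List String) × List String) t =>
      if t = "ii" then (st.1 ++ [debianRecord st.2], []) else (st.1, st.2 ++ [t]))
    ([], [])
  st.1 ++ [debianRecord st.2]

-- ===== CLAIM (what is proved, stated in full; the proofs are below) =====
def Spec_debian_parse (input_list : List String) (out : List (List String)) : Prop := out = debian_parse_alt input_list
instance (input_list : List String) (out : List (List String)) : Decidable (Spec_debian_parse input_list out) := by unfold Spec_debian_parse; infer_instance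

def Claim_equal_debian_parse : Prop := ∀ (input_list : List String), Dom_debian_parse input_list → Spec_debian_parse input_list (debian_parse input_list)

-- ===== LEMMAS AND PROOFS =====

-- description string of a segment
def debianDesc (seg : List String) : String :=
  String.join ((seg.drop 3).map (fun x => " " ++ x))

lemma debianDesc_append_of_ge (seg : List String) (t : String) (h : 3 ≤ seg.length) :
    debianDesc (seg ++ [t]) = debianDesc seg ++ " " ++ t := by
  simp [debianDesc, List.drop_append_of_le_length (by omega : 3 ≤ seg.length),
        String.join, String.append_assoc]

lemma debianDesc_short (seg : List String) (h : seg.length ≤ 3) : debianDesc seg = "" := by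
  simp [debianDesc, List.drop_eq_nil_iff.mpr (by omega)]
  rfl

-- the key invariant: A's fold from a state describing segment `seg` matches B's fold
lemma debian_invariant (l : List String) (res : List (List String)) (seg : List String) :
    (let st := l.foldl
      (fun (st : Int × String × List (List String) × List String) input_str =>
        let (description, str_description, res_list, package_info) := st
        if input_str = "ii" then
          (3, "", res_list ++ [package_info ++ [str_description]], [])
        else if description = 0 then
          (description, str_description ++ " " ++ input_str, res_list, package_info)
        else
          (description - 1, str_description, res_list, package_info ++ [input_str]))
      ((3 : Int) - min 3 (seg.length : Int), debianDesc seg, res, seg.take 3)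
     st.2.2.1 ++ [st.2.2.2 ++ [st.2.1]])
    =
    (let st := l.foldl
      (fun (st : List (List String) × List String) t =>
        if t = "ii" then (st.1 ++ [debianRecord st.2], []) else (st.1, st.2 ++ [t]))
      (res, seg)
     st.1 ++ [debianRecord st.2]) := by
  induction l generalizing res seg with
  | nil =>
      simp only [List.foldl_nil, debianRecord, debianDesc]
  | cons t l ih =>
      simp only [List.foldl_cons]
      by_cases ht : t = "ii"
      · subst ht
        simp only [reduceIte]
        have := ih (res ++ [debianRecord seg]) []
        simpa [debianRecord, debianDesc] using this
      · simp only [if_neg ht]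
        by_cases h3 : 3 ≤ seg.length
        · have hd0 : (3 : Int) - min 3 (seg.length : Int) = 0 := by
            have : (3 : Int) ≤ (seg.length : Int) := by exact_mod_cast h3
            omega
          rw [hd0]
          simp only [reduceIte]
          have := ih res (seg ++ [t])
          have hlen : min 3 ((seg ++ [t]).length : Int) = 3 := by
            simp only [List.length_append, List.length_cons, List.length_nil]
            have : (3 : Int) ≤ (seg.length : Int) := by exact_mod_cast h3
            push_cast
            omega
          rw [hlen] at this
          have htake : (seg ++ [t]).take 3 = seg.take 3 :=
            List.take_append_of_le_length (by omega)
          rw [htake, debianDesc_append_of_ge seg t h3] at this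
          simpa [hd0] using this
        · have hlt : seg.length < 3 := by omega
          have hdne : (3 : Int) - min 3 (seg.length : Int) ≠ 0 := by
            have : (seg.length : Int) < 3 := by exact_mod_cast hlt
            omega
          simp only [if_neg hdne]
          have := ih res (seg ++ [t])
          have hlen : min 3 ((seg ++ [t]).length : Int) = (seg.length : Int) + 1 := by
            simp only [List.length_append, List.length_cons, List.length_nil]
            have : (seg.length : Int) < 3 := by exact_mod_cast hlt
            push_cast
            omega
          rw [hlen] at this
          have htake : (seg ++ [t]).take 3 = seg.take 3 ++ [t] := by
            rw [List.take_append]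
            congr 1
            exact List.take_of_length_le (by simp; omega)
          have hdesc : debianDesc (seg ++ [t]) = debianDesc seg := by
            rw [debianDesc_short _ (by simp; omega), debianDesc_short _ (by omega)]
          rw [htake, hdesc] at this
          have harith : (3 : Int) - min 3 (seg.length : Int) - 1 = 3 - ((seg.length : Int) + 1) := by
            have : (seg.length : Int) < 3 := by exact_mod_cast hlt
            omega
          rw [harith]
          exact this

-- ===== VERDICT (by name: the statement is the Claim_ definition above) =====
theorem debian_parse_spec : Claim_equal_debian_parse := by
  intro input_list _
  unfold Spec_debian_parse debian_parse debian_parse_alt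
  have := debian_invariant input_list [] []
  simpa [debianDesc] using this
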